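-- pv_equiv track=rewrite | github.com/artacone/yandex_algo_train2 | 2/E.py | get_min_time
-- ===== SOURCE A (Python) =====
-- def get_min_time(folders):
--     total_diplomas = 0
--     min_folder = 0
--     for folder in folders:
--         total_diplomas += folder
--         if folder > min_folder:
--             min_folder = folder
--     return total_diplomas - min_folder
-- ===== SOURCE B (Python) =====
-- def get_min_time(folders):
--     s = sorted(folders)
--     if s and s[-1] > 0:
--         return sum(s[:-1])
--     return sum(s)
-- ===== Notes on version B (the rewrite author's own statement) =====
-- stated objective: alternative
-- what changed: B sorts the list ascending and returns the sum of all but the last (largest) element when that element is positive, otherwise the sum of all elements; A fuses a running total with a conditional running maximum in one loop.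
import Mathlib
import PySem

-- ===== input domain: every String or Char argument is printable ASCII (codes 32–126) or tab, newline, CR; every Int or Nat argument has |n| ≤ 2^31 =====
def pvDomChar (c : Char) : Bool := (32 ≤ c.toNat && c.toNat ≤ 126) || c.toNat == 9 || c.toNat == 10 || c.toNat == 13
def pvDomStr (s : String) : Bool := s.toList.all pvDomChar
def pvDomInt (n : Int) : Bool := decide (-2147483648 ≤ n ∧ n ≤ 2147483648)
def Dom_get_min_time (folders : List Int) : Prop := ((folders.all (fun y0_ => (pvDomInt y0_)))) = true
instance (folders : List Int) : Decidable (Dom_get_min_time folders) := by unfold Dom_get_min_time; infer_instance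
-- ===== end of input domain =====

-- B sorts ascending and drops the last (largest) element from the sum when it is positive, instead of A's fused total+running-max loop; objective: alternative.

-- ===== PORT A =====
-- literal port of A's single loop over the pair state (total_diplomas, min_folder)
def get_min_time (folders : List Int) : Int :=
  let st := folders.foldl
    (fun (s : Int × Int) folder =>
      let s := (s.1 + folder, s.2)
      if folder > s.2 then (s.1, folder) else s)
    (0, 0)
  st.1 - st.2

-- ===== PORT B =====
-- s = sorted(folders); if s and s[-1] > 0: return sum(s[:-1]); return sum(s)
def get_min_time_alt (folders : List Int) : Int :=
  let s := PySem.List.sorted folders (fun x => x) false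
  if s ≠ [] ∧ PySem.List.pyGetD s (-1) 0 > 0 then
    (PySem.List.slice s none (some (-1))).sum
  else s.sum

-- ===== PRECONDITION & SPEC =====
def Spec_get_min_time (folders : List Int) (out : Int) : Prop := out = get_min_time_alt folders
instance (folders : List Int) (out : Int) : Decidable (Spec_get_min_time folders out) := by unfold Spec_get_min_time; infer_instance

-- ===== CLAIM (what is proved, stated in full; the proofs are below) =====
def Claim_equal_get_min_time : Prop := ∀ (folders : List Int), Dom_get_min_time folders → Spec_get_min_time folders (get_min_time folders)

-- ===== LEMMAS AND PROOFS =====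
-- A's loop computes (sum, running max floored at 0)
theorem pv_loop_eq (folders : List Int) (t m : Int) :
    folders.foldl
      (fun (s : Int × Int) folder =>
        let s := (s.1 + folder, s.2)
        if folder > s.2 then (s.1, folder) else s)
      (t, m)
    = (t + folders.sum, folders.foldl max m) := by
  induction folders generalizing t m with
  | nil => simp
  | cons x xs ih =>
    simp only [List.foldl_cons, List.sum_cons, ih]
    split
    · next h => simp [max_eq_right (le_of_lt h)]; ring_nf
    · next h => simp [max_eq_left (by omega : x ≤ m)]; ring_nf

-- foldl max over a permutation is unchanged (max is left-commutative)
theorem pv_foldl_max_perm {xs ys : List Int} (h : xs.Perm ys) (a : Int) :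
    xs.foldl max a = ys.foldl max a :=
  h.foldl_eq' (fun x _ y _ z => max_right_comm z x y) a

-- on a ≤-sorted list, the running max ends at the last element
theorem pv_foldl_max_sorted (s : List Int) (hs : s.Pairwise (· ≤ ·)) (hne : s ≠ []) (a : Int) :
    s.foldl max a = max a (s.getLast hne) := by
  induction s generalizing a with
  | nil => exact absurd rfl hne
  | cons x t ih =>
    cases t with
    | nil => simp
    | cons y u =>
      have hpair := (List.pairwise_cons.mp hs)
      have hrest : (y :: u).Pairwise (· ≤ ·) := hpair.2
      have h1 : x ≤ (y :: u).getLast (by simp) :=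
        hpair.1 _ (List.getLast_mem _)
      rw [List.foldl_cons, ih hrest (by simp) (max a x),
        List.getLast_cons (by simp : (y :: u) ≠ ([] : List Int)),
        max_assoc, max_eq_right h1]

-- sum splits at the last element
theorem pv_sum_dropLast (s : List Int) (hne : s ≠ []) :
    s.dropLast.sum = s.sum - s.getLast hne := by
  rcases s.eq_nil_or_concat with rfl | ⟨l, x, rfl⟩
  · exact absurd rfl hne
  · simp [List.concat_eq_append]

-- ===== VERDICT (by name: the statement is the Claim_ definition above) =====
theorem get_min_time_spec : Claim_equal_get_min_time := by
  intro folders _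
  unfold Spec_get_min_time get_min_time get_min_time_alt
  simp only [pv_loop_eq, zero_add]
  obtain ⟨s, hsdef⟩ : ∃ s, PySem.List.sorted folders (fun x => x) false = s := ⟨_, rfl⟩
  rw [hsdef]
  have hperm : s.Perm folders := hsdef ▸ PySem.List.sorted_perm ..
  have hsum : s.sum = folders.sum := hperm.sum_eq
  have hmax : folders.foldl max 0 = s.foldl max 0 :=
    pv_foldl_max_perm hperm.symm 0
  have hsorted : s.Pairwise (· ≤ ·) := by
    have := PySem.List.sorted_pairwise folders (fun x => x)
    rw [hsdef] at this; simpa using this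
  by_cases hne : s = []
  · subst hne
    simp at hsum ⊢
    simp [hmax, ← hsum]
  · have hlast := pv_foldl_max_sorted s hsorted hne 0
    have hget : PySem.List.pyGetD s (-1) 0 = s.getLast hne :=
      PySem.List.pyGetD_neg_one s 0 hne
    have hslice : PySem.List.slice s none (some (-1)) = s.dropLast :=
      PySem.List.slice_to_neg_one s
    by_cases hpos : s.getLast hne > 0
    · rw [if_pos ⟨hne, by rw [hget]; exact hpos⟩, hslice, pv_sum_dropLast s hne,
        hsum, hmax, hlast]
      omega
    · rw [if_neg (by rw [hget]; exact fun h => hpos h.2), hsum, hmax, hlast]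
      omega
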